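-- pv_equiv track=rewrite | github.com/MinKyeom/KMK-DREAM | Programmers/Lv1/신규 아이디 추천.py | solution
-- ===== SOURCE A (Python) =====
-- def solution(new_id):
--     check = "0123456789abcdefghijklmnopqrstuvwxyz-_."
--     check_eng = "abcdefghijklmnopqrstuvwxyz"
--     check_eng_big = check_eng.upper()
--     check_eng = check_eng + check_eng_big
--     result = []
--     k = list(new_id)
--
--     for x in range(len(k)):
--         if k[x] in check_eng:
--             k[x] = k[x].lower()
--
--         if not k[x] in check:
--             continue
--         else:
--             result.append(k[x])
--
--     r_2 = "".join(result)
--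
--     while True:
--         if ".." in r_2:
--             r_2 = r_2.replace("..", ".")
--         else:
--             break
--
--     r_2 = list(r_2)
--     r_3 = []
--
--     for g in range(len(r_2)):
--         if g == 0 or g == len(r_2) - 1:
--             if r_2[g] == ".":
--                 continue
--             else:
--                 r_3.append(r_2[g])
--         else:
--             r_3.append(r_2[g])
--
--     final = "".join(r_3)
--
--     if len(final) <= 2:
--         l = 3 - len(final)
--         c = final[len(final) - 1:]
--         for y in range(l):
--             final = final + c
--         return final if len(final) != 0 else "aaa"
--
--     elif len(final) >= 16:
--         return final[0:15] if final[14:15] != "." else final[0:14]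
--
--     else:
--         return final
-- ===== SOURCE B (Python) =====
-- def solution(new_id):
--     # single streaming pass with an accumulator: lowercase, filter, collapse runs of
--     # dots and drop leading dots on the fly, stopping as soon as 15 chars are kept;
--     # then one trailing-dot strip, empty default, and padding.
--     out = []
--     for ch in new_id:
--         if len(out) == 15:
--             break
--         c = ch.lower()
--         if c == '.':
--             if out and out[-1] != '.':
--                 out.append('.')
--         elif c in "abcdefghijklmnopqrstuvwxyz0123456789-_":
--             out.append(c)
--     if out and out[-1] == '.':
--         out.pop()
--     if not out:
--         out = ['a']
--     while len(out) < 3: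
--         out.append(out[-1])
--     return ''.join(out)
-- ===== Notes on version B (the rewrite author's own statement) =====
-- stated objective: alternative
-- what changed: Replaces A's five staged passes (indexed lower-and-filter loop, fixpoint whole-string replace to collapse dots, indexed edge-dot loop, length-cased truncation/padding) by ONE streaming pass with an accumulator that lowercases, filters, collapses dot runs and drops leading dots on the fly and stops early once 15 characters are kept, followed only by a trailing-dot pop, empty default and padding.
import Mathlib
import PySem

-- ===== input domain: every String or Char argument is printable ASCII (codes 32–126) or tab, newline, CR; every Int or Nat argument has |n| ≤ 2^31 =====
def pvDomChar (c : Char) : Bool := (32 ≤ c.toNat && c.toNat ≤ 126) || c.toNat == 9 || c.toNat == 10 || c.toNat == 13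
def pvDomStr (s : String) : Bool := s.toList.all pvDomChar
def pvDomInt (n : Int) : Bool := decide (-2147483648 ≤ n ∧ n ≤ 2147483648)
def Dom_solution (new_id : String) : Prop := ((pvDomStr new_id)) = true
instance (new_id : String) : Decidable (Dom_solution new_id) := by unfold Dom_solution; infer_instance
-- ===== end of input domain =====

-- B replaces A's five staged passes by ONE streaming pass with an accumulator (lowercase,
-- filter, collapse dot runs and drop leading dots on the fly, early exit at 15 kept chars),
-- followed only by a trailing-dot pop, empty default and padding.

-- ===== PORT A =====
-- The lemmas before pvWhileCollapse exist only because its termination proof cites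
-- replace_dd_length_lt by name (Python's while loop terminates because replace shortens r_2).

-- one left-to-right pass of s.replace("..", ".") (proof-side characterisation of PySem.Chars.replace)
def pvRepDD : List Char → List Char
  | '.' :: '.' :: t => '.' :: pvRepDD t
  | c :: t => c :: pvRepDD t
  | [] => []

theorem pvRepDD_cons_of_ne (c : Char) (t : List Char)
    (h : List.isPrefixOf ['.','.'] (c :: t) = false) : pvRepDD (c :: t) = c :: pvRepDD t := by
  rw [pvRepDD.eq_def]
  split
  · rename_i t' heq
    injection heq with h1 h2; subst h1; subst h2
    simp [List.isPrefixOf] at h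
  · rename_i c' t' hne heq
    injection heq with h1 h2; subst h1; subst h2; rfl
  · rename_i heq; cases heq

theorem pvRepDD_eq_go : ∀ (fuel : Nat) (l acc : List Char), l.length ≤ fuel →
    PySem.Chars.replace.go ['.', '.'] ['.'] fuel l acc = acc.reverse ++ pvRepDD l := by
  intro fuel
  induction fuel with
  | zero => intro l acc h; simp at h; subst h; simp [PySem.Chars.replace.go, pvRepDD]
  | succ n ih =>
    intro l acc h
    cases l with
    | nil => simp [PySem.Chars.replace.go, pvRepDD]
    | cons c t =>
      rw [PySem.Chars.replace.go.eq_def]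
      simp only [List.length_cons] at h
      by_cases hp : List.isPrefixOf ['.','.'] (c :: t) = true
      · obtain ⟨c', t', rfl⟩ : ∃ c' t', t = c' :: t' := by
          cases t with
          | nil => simp [List.isPrefixOf] at hp
          | cons c' t' => exact ⟨c', t', rfl⟩
        simp only [List.isPrefixOf, Bool.and_eq_true, beq_iff_eq] at hp
        obtain ⟨rfl, rfl⟩ := And.intro hp.1 hp.2.1
        simp only []
        rw [if_pos (by simp [List.isPrefixOf])]
        show PySem.Chars.replace.go ['.', '.'] ['.'] n t' ('.' :: acc) = _
        rw [ih t' ('.' :: acc) (by simp at h; omega)]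
        simp [pvRepDD]
      · simp only []
        rw [if_neg hp]
        rw [ih t (c :: acc) (by omega)]
        rw [pvRepDD_cons_of_ne c t (by simp only [Bool.not_eq_true] at hp; exact hp)]
        simp

theorem pvPrefixFalse (c : Char) (t : List Char)
    (hne : ∀ (t' : List Char), c = '.' → t = '.' :: t' → False) :
    List.isPrefixOf ['.','.'] (c :: t) = false := by
  cases t with
  | nil => simp [List.isPrefixOf]
  | cons d t' =>
    simp only [List.isPrefixOf, Bool.and_eq_false_iff, beq_eq_false_iff_ne, ne_eq]
    by_cases h1 : c = '.'
    · by_cases h2 : d = '.'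
      · exact absurd (hne t' h1 (by rw [h2])) (by simp)
      · exact Or.inr (Or.inl fun hd => h2 hd.symm)
    · exact Or.inl fun hc => h1 hc.symm

theorem replace_dd_eq (s : List Char) :
    PySem.Chars.replace s ['.', '.'] ['.'] = pvRepDD s := by
  show PySem.Chars.replace s _ _ = _
  rw [PySem.Chars.replace]
  rw [if_neg (by simp)]
  exact pvRepDD_eq_go s.length s [] le_rfl

theorem pvRepDD_length_le (s : List Char) : (pvRepDD s).length ≤ s.length := by
  induction s using pvRepDD.induct with
  | case1 t ih => simp [pvRepDD]; omega
  | case2 c t hne ih =>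
    rw [pvRepDD_cons_of_ne c t (pvPrefixFalse c t hne)]
    simp; omega
  | case3 => simp [pvRepDD]

theorem pvRepDD_length_lt (s : List Char) (h : ['.','.'] <:+: s) :
    (pvRepDD s).length < s.length := by
  induction s using pvRepDD.induct with
  | case1 t ih => have := pvRepDD_length_le t; simp [pvRepDD]; omega
  | case2 c t hne ih =>
    rw [pvRepDD_cons_of_ne c t (pvPrefixFalse c t hne)]
    rcases List.infix_cons_iff.mp h with hpre | hinf
    · exfalso
      rcases t with _ | ⟨d, t'⟩
      · simp [List.prefix_cons_iff] at hpre
      · obtain ⟨h1, h2⟩ : '.' = c ∧ '.' = d := by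
          simpa [List.prefix_cons_iff] using hpre
        exact hne t' h1.symm (by rw [← h2])
    · have := ih hinf; simp; omega
  | case3 => simp at h

theorem replace_dd_length_lt (s : List Char)
    (h : PySem.Chars.isIn ['.', '.'] s = true) :
    (PySem.Chars.replace s ['.', '.'] ['.']).length < s.length := by
  rw [replace_dd_eq]
  exact pvRepDD_length_lt s ((PySem.Chars.isIn_iff_infix _ _).mp h)

-- the `while True: if ".." in r_2: r_2 = r_2.replace("..", ".") else: break` loop of A
def pvWhileCollapse (s : List Char) : List Char :=
  if PySem.Chars.isIn ['.', '.'] s = true then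
    pvWhileCollapse (PySem.Chars.replace s ['.', '.'] ['.'])
  else s
termination_by s.length
decreasing_by exact replace_dd_length_lt s (by assumption)

-- A's constant strings
def pvCheck : List Char := "0123456789abcdefghijklmnopqrstuvwxyz-_.".toList
def pvCheckEng : List Char :=
  "abcdefghijklmnopqrstuvwxyz".toList ++ PySem.Chars.upper "abcdefghijklmnopqrstuvwxyz".toList

-- literal transliteration of A on the character list (single-char `x in str` is membership)
def pvSolA (cs : List Char) : List Char :=
  let result := (PySem.List.pyRange 0 (PySem.List.len cs)).foldl (fun res x =>
      let c0 := PySem.List.pyGetD cs x ' '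
      let c := if pvCheckEng.contains c0 then PySem.Chars.lowerChar c0 else c0
      if !(pvCheck.contains c) then res else res ++ [c]) []
  let r2 := pvWhileCollapse result
  let r3 := (PySem.List.pyRange 0 (PySem.List.len r2)).foldl (fun r3 g =>
      if g = 0 ∨ g = PySem.List.len r2 - 1 then
        if PySem.List.pyGetD r2 g ' ' = '.' then r3 else r3 ++ [PySem.List.pyGetD r2 g ' ']
      else r3 ++ [PySem.List.pyGetD r2 g ' ']) []
  let final := r3
  if final.length ≤ 2 then
    let l : Nat := 3 - final.length
    let c := PySem.List.slice final (some (PySem.List.len final - 1)) none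
    let final := (List.range l).foldl (fun f _ => f ++ c) final
    if final.length ≠ 0 then final else "aaa".toList
  else if 16 ≤ final.length then
    if PySem.List.slice final (some 14) (some 15) ≠ ['.'] then
      PySem.List.slice final (some 0) (some 15)
    else PySem.List.slice final (some 0) (some 14)
  else final

def solution (new_id : String) : String := String.ofList (pvSolA new_id.toList)

-- ===== PORT B =====

-- the character class "abcdefghijklmnopqrstuvwxyz0123456789-_" of Source B
def pvAllowedB : List Char := "abcdefghijklmnopqrstuvwxyz0123456789-_".toList

-- Source B's single `for ch in new_id` loop with its `break` at 15 kept characters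
def pvScan : List Char → List Char → List Char
  | out, [] => out
  | out, ch :: t =>
    if out.length = 15 then out
    else
      if PySem.Chars.lowerChar ch = '.' then
        if out ≠ [] ∧ out.getLast? ≠ some '.' then pvScan (out ++ ['.']) t
        else pvScan out t
      else if pvAllowedB.contains (PySem.Chars.lowerChar ch) then
        pvScan (out ++ [PySem.Chars.lowerChar ch]) t
      else pvScan out t

-- the `while len(out) < 3: out.append(out[-1])` loop of Source B
def pvPad3 (s : List Char) : List Char :=
  if s.length < 3 then
    match s.getLast? with
    | some c => pvPad3 (s ++ [c])
    | none => s
  else s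
termination_by 3 - s.length
decreasing_by simp_all; omega

-- transliteration of Source B
def pvSolB (cs : List Char) : List Char :=
  let out := pvScan [] cs
  let out := if out ≠ [] ∧ out.getLast? = some '.' then out.dropLast else out
  let out := if out = [] then ['a'] else out
  pvPad3 out

def solution_alt (new_id : String) : String := String.ofList (pvSolB new_id.toList)

-- ===== PRECONDITION & SPEC =====
def Spec_solution (new_id : String) (out : String) : Prop := out = solution_alt new_id
instance (new_id : String) (out : String) : Decidable (Spec_solution new_id out) := by unfold Spec_solution; infer_instance

-- ===== CLAIM (what is proved, stated in full; the proofs are below) =====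
def Claim_equal_solution : Prop := ∀ (new_id : String), Dom_solution new_id → Spec_solution new_id (solution new_id)

-- ===== LEMMAS AND PROOFS =====

-- Proof-side staged mid-form (A's five passes, on which both ports meet).
def pvAllowed : List Char := pvAllowedB ++ ['.']

def pvFL (cs : List Char) : List Char :=
  (PySem.Chars.lower cs).filter (fun c => pvAllowed.contains c)

def pvSqueeze : List Char → List Char
  | [] => []
  | c :: t => if c = '.' ∧ t.head? = some '.' then pvSqueeze t else c :: pvSqueeze t

def pvHeadStrip (s : List Char) : List Char :=
  if s.head? = some '.' then s.tail else s

def pvTailStrip (s : List Char) : List Char :=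
  if s.getLast? = some '.' then s.dropLast else s

def pvStripEdge (s : List Char) : List Char := pvTailStrip (pvHeadStrip s)

-- Stage 1: A's indexed lower-and-filter loop = filter of the lowercased list.
def pvStep (c : Char) : List Char :=
  let c' := if pvCheckEng.contains c then PySem.Chars.lowerChar c else c
  if !(pvCheck.contains c') then [] else [c']

theorem pvStep_eq (c : Char) (h : pvDomChar c = true) :
    pvStep c = (if pvAllowed.contains (PySem.Chars.lowerChar c) then [PySem.Chars.lowerChar c] else []) := by
  have hb : c.toNat < 127 := by
    simp only [pvDomChar, Bool.or_eq_true, Bool.and_eq_true, decide_eq_true_eq, beq_iff_eq] at h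
    omega
  have key : ∀ n, n < 127 → pvStep (Char.ofNat n) =
      (if pvAllowed.contains (PySem.Chars.lowerChar (Char.ofNat n)) then [PySem.Chars.lowerChar (Char.ofNat n)] else []) := by
    set_option maxRecDepth 8192 in decide
  have := key c.toNat hb
  rwa [Char.ofNat_toNat] at this

theorem pvFlatMap_step (cs : List Char) (h : ∀ c ∈ cs, pvDomChar c = true) :
    List.flatMap pvStep cs =
      List.filter (fun c => pvAllowed.contains c) (List.map PySem.Chars.lowerChar cs) := by
  induction cs with
  | nil => rfl
  | cons c t ih =>
    simp only [List.flatMap_cons, List.map_cons, List.filter_cons]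
    rw [pvStep_eq c (h c List.mem_cons_self), ih (fun d hd => h d (List.mem_cons_of_mem c hd))]
    by_cases hm : PySem.Chars.lowerChar c ∈ pvAllowed
    · simp [hm]
    · simp [hm]

theorem pvLoop1_eq (cs : List Char) (h : ∀ c ∈ cs, pvDomChar c = true) :
    (PySem.List.pyRange 0 (PySem.List.len cs)).foldl (fun res x =>
      let c0 := PySem.List.pyGetD cs x ' '
      let c := if pvCheckEng.contains c0 then PySem.Chars.lowerChar c0 else c0
      if !(pvCheck.contains c) then res else res ++ [c]) [] = pvFL cs := by
  have hbody : (fun (res : List Char) (x : Int) =>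
      let c0 := PySem.List.pyGetD cs x ' '
      let c := if pvCheckEng.contains c0 then PySem.Chars.lowerChar c0 else c0
      if !(pvCheck.contains c) then res else res ++ [c]) =
      (fun res x => res ++ pvStep (PySem.List.pyGetD cs x ' ')) := by
    funext res x
    simp only [pvStep]
    split <;> (split <;> simp)
  rw [hbody, PySem.List.foldl_append_eq_flatMap, List.nil_append]
  rw [List.flatMap_def]
  have hmm : (List.map (fun x => pvStep (PySem.List.pyGetD cs x ' '))
      (PySem.List.pyRange 0 (PySem.List.len cs))) =
      List.map pvStep (List.map (fun x => PySem.List.pyGetD cs x ' ')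
        (PySem.List.pyRange 0 (PySem.List.len cs))) := by
    rw [List.map_map]; rfl
  rw [hmm, PySem.List.map_pyGetD_pyRange_zero, ← List.flatMap_def]
  rw [pvFL, show (PySem.Chars.lower cs) = cs.map PySem.Chars.lowerChar from rfl]
  exact pvFlatMap_step cs h

-- Stage 2: the while/replace loop collapses dot runs exactly like pvSqueeze.
theorem pvRepDD_head? (u : List Char) : (pvRepDD u).head? = u.head? := by
  induction u using pvRepDD.induct with
  | case1 t ih => simp [pvRepDD]
  | case2 c t hne ih => rw [pvRepDD_cons_of_ne c t (pvPrefixFalse c t hne)]; simp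
  | case3 => simp [pvRepDD]

theorem pvSqueeze_repDD (u : List Char) : pvSqueeze (pvRepDD u) = pvSqueeze u := by
  induction u using pvRepDD.induct with
  | case1 t ih =>
    rw [show pvRepDD ('.' :: '.' :: t) = '.' :: pvRepDD t from rfl]
    rw [show pvSqueeze ('.' :: '.' :: t) = pvSqueeze ('.' :: t) by simp [pvSqueeze]]
    rw [pvSqueeze, pvRepDD_head?]
    cases ht : t.head? with
    | none => cases t with
      | nil => simp [pvSqueeze] at ih ⊢; exact ih
      | cons d t' => simp at ht
    | some d =>
      by_cases hd : d = '.'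
      · subst hd
        rw [if_pos ⟨rfl, rfl⟩, ih]
        rw [show pvSqueeze ('.' :: t) = pvSqueeze t from by rw [pvSqueeze, if_pos ⟨rfl, ht⟩]]
      · rw [if_neg (by simp [hd]), ih]
        rw [show pvSqueeze ('.' :: t) = '.' :: pvSqueeze t from by
          rw [pvSqueeze, if_neg (by simp [ht, hd])]]
  | case2 c t hne ih =>
    rw [pvRepDD_cons_of_ne c t (pvPrefixFalse c t hne)]
    rw [pvSqueeze, pvSqueeze, pvRepDD_head?, ih]
  | case3 => rfl

theorem pvSqueeze_fix (u : List Char) (h : ¬ ['.','.'] <:+: u) : pvSqueeze u = u := by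
  induction u with
  | nil => rfl
  | cons c t ih =>
    rw [pvSqueeze, if_neg, ih (fun hin => h (List.infix_cons hin))]
    rintro ⟨rfl, hh⟩
    cases t with
    | nil => simp at hh
    | cons d t' =>
      simp at hh
      exact h (by rw [hh]; exact ⟨[], t', rfl⟩)

theorem pvWhileCollapse_eq (s : List Char) : pvWhileCollapse s = pvSqueeze s := by
  induction s using pvWhileCollapse.induct with
  | case1 s hin ih =>
    rw [pvWhileCollapse, if_pos hin, ih, replace_dd_eq, pvSqueeze_repDD]
  | case2 s hin =>
    rw [pvWhileCollapse, if_neg hin,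
      pvSqueeze_fix s ((PySem.Chars.isIn_eq_false_iff _ _).mp (by simpa using hin))]

theorem pvSqueeze_head? (u : List Char) : (pvSqueeze u).head? = u.head? := by
  induction u with
  | nil => rfl
  | cons c t ih =>
    rw [pvSqueeze]
    split
    · rename_i hcond; rw [ih, hcond.2]; simp [hcond.1]
    · simp

theorem pvSqueeze_no_dd (u : List Char) : ¬ ['.','.'] <:+: pvSqueeze u := by
  induction u with
  | nil => simp [pvSqueeze]
  | cons c t ih =>
    rw [pvSqueeze]
    split
    · exact ih
    · rename_i hcond
      intro hin
      rcases List.infix_cons_iff.mp hin with hpre | hinf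
      · rcases hsq : pvSqueeze t with _ | ⟨d, t'⟩
        · rw [hsq] at hpre; simp [List.prefix_cons_iff] at hpre
        · rw [hsq] at hpre
          obtain ⟨h1, h2⟩ : '.' = c ∧ '.' = d := by simpa [List.prefix_cons_iff] using hpre
          apply hcond
          refine ⟨h1.symm, ?_⟩
          have := pvSqueeze_head? t
          rw [hsq] at this
          simp at this
          rw [← this, ← h2]
      · exact ih hinf

-- Stage 3: A's edge-dot-skipping index loop = pvStripEdge.
theorem pvMap_getD_range' {α : Type} (d : α) :
    ∀ (b a : Nat) (xs : List α), a + b ≤ xs.length →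
    (List.range' a b).map (fun i => xs.getD i d) = (xs.drop a).take b := by
  intro b
  induction b with
  | zero => intro a xs h; simp
  | succ m ih =>
    intro a xs h
    rw [List.range'_succ, List.map_cons, ih (a+1) xs (by omega)]
    rw [List.drop_eq_getElem_cons (by omega : a < xs.length)]
    rw [List.take_succ_cons, List.getD_eq_getElem _ _ (by omega : a < xs.length)]

theorem pvFlatMap_single {α β : Type} (g : α → β) (l : List α) :
    List.flatMap (fun x => [g x]) l = l.map g := by
  induction l with
  | nil => rfl
  | cons x xs ih => simp [ih]

theorem pvLoop3_eq (r2 : List Char) :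
    (PySem.List.pyRange 0 (PySem.List.len r2)).foldl (fun r3 g =>
      if g = 0 ∨ g = PySem.List.len r2 - 1 then
        if PySem.List.pyGetD r2 g ' ' = '.' then r3 else r3 ++ [PySem.List.pyGetD r2 g ' ']
      else r3 ++ [PySem.List.pyGetD r2 g ' ']) [] = pvStripEdge r2 := by
  have hbody : (fun (r3 : List Char) (g : Int) =>
      if g = 0 ∨ g = PySem.List.len r2 - 1 then
        if PySem.List.pyGetD r2 g ' ' = '.' then r3 else r3 ++ [PySem.List.pyGetD r2 g ' ']
      else r3 ++ [PySem.List.pyGetD r2 g ' ']) = (fun r3 g => r3 ++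
        (if (g = 0 ∨ g = PySem.List.len r2 - 1) ∧ PySem.List.pyGetD r2 g ' ' = '.' then []
         else [PySem.List.pyGetD r2 g ' '])) := by
    funext r3 g
    split
    · split
      · rename_i h1 h2; rw [if_pos ⟨h1, h2⟩]; simp
      · rename_i h1 h2; rw [if_neg (fun hc => h2 hc.2)]
    · rename_i h1; rw [if_neg (fun hc => h1 hc.1)]
  rw [hbody, PySem.List.foldl_append_eq_flatMap, List.nil_append]
  have hlen : PySem.List.len r2 = ((r2.length : Nat) : Int) := by simp [PySem.List.len]
  rw [hlen, PySem.List.pyRange_zero_natCast, List.flatMap_map]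
  match r2 with
  | [] => rfl
  | [c] =>
    by_cases hc : c = '.' <;>
      simp [pvStripEdge, pvHeadStrip, pvTailStrip, List.range_succ, PySem.List.pyGetD_natCast, hc]
  | a :: b :: t =>
    have hcongr : ∀ j ∈ List.range (a::b::t).length,
        (if ((j:Int) = 0 ∨ (j:Int) = ((a::b::t).length : Int) - 1) ∧
            PySem.List.pyGetD (a::b::t) (j:Int) ' ' = '.' then ([] : List Char)
         else [PySem.List.pyGetD (a::b::t) (j:Int) ' ']) =
        (if (j = 0 ∨ j = t.length + 1) ∧ (a::b::t).getD j ' ' = '.' then ([] : List Char)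
         else [(a::b::t).getD j ' ']) := by
      intro j hj
      rw [PySem.List.pyGetD_natCast]
      have hiff : ((j:Int) = 0 ∨ (j:Int) = ((a::b::t).length : Int) - 1) ↔ (j = 0 ∨ j = t.length + 1) := by
        simp only [List.length_cons]
        push_cast
        omega
      by_cases hc : (j = 0 ∨ j = t.length + 1) ∧ (a::b::t).getD j ' ' = '.'
      · rw [if_pos ⟨hiff.mpr hc.1, hc.2⟩, if_pos hc]
      · rw [if_neg (fun hx => hc ⟨hiff.mp hx.1, hx.2⟩), if_neg hc]
    rw [List.flatMap_congr hcongr]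
    have hrange : List.range (a::b::t).length = 0 :: (List.range' 1 t.length ++ [1 + t.length]) := by
      rw [List.range_eq_range']
      rw [show (a::b::t).length = (t.length + 1) + 1 from by simp [Nat.add_comm]]
      rw [List.range'_succ, ← List.range'_1_concat]
    rw [hrange, List.flatMap_cons, List.flatMap_append, List.flatMap_singleton]
    have hmid : List.flatMap (fun j =>
        if (j = 0 ∨ j = t.length + 1) ∧ (a::b::t).getD j ' ' = '.' then ([] : List Char)
        else [(a::b::t).getD j ' ']) (List.range' 1 t.length) =
        (b::t).dropLast := by
      have h1 : ∀ j ∈ List.range' 1 t.length,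
          (if (j = 0 ∨ j = t.length + 1) ∧ (a::b::t).getD j ' ' = '.' then ([] : List Char)
           else [(a::b::t).getD j ' ']) = [(a::b::t).getD j ' '] := by
        intro j hj
        rw [List.mem_range'_1] at hj
        rw [if_neg (fun hx => by rcases hx.1 with h | h <;> omega)]
      rw [List.flatMap_congr h1, pvFlatMap_single (fun j => (a::b::t).getD j ' ') (List.range' 1 t.length),
        pvMap_getD_range' ' ' t.length 1 (a::b::t) (by simp; omega)]
      rw [List.drop_one, List.tail_cons]
      rw [show (b::t).take t.length = (b::t).dropLast from by
        rw [List.dropLast_eq_take]; simp]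
    rw [hmid]
    have hne : (b::t) ≠ [] := by simp
    have hlast : (a::b::t).getD (t.length + 1) ' ' = (b::t).getLast hne := by
      rw [List.getD_eq_getElem _ _ (by simp : t.length + 1 < (a::b::t).length)]
      rw [List.getLast_eq_getElem]
      simp
    have hget0 : (a::b::t).getD 0 ' ' = a := rfl
    have hlast? : (b::t).getLast? = some ((b::t).getLast hne) := List.getLast?_eq_some_getLast hne
    rw [show (1 + t.length) = t.length + 1 from Nat.add_comm 1 t.length]
    simp only [hget0, hlast]
    by_cases ha : a = '.'
    · subst ha
      rw [if_pos (by simp), List.nil_append]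
      rw [show pvStripEdge ('.'::b::t) = (if (b::t).getLast? = some '.' then (b::t).dropLast else (b::t)) from by
        simp [pvStripEdge, pvHeadStrip, pvTailStrip]]
      by_cases hl : (b::t).getLast hne = '.'
      · rw [if_pos (by simp [hl]), if_pos (by rw [hlast?, hl]), List.append_nil]
      · rw [if_neg (by simp [hl]), if_neg (by rw [hlast?]; simpa using hl)]
        exact List.dropLast_concat_getLast hne
    · rw [if_neg (by simp [ha]), List.singleton_append]
      rw [show pvStripEdge (a::b::t) =
          (if (a::b::t).getLast? = some '.' then (a::b::t).dropLast else (a::b::t)) from by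
        simp [pvStripEdge, pvHeadStrip, pvTailStrip, ha]]
      have hlast?' : (a::b::t).getLast? = (b::t).getLast? := by simp
      have hdl : (a::b::t).dropLast = a :: (b::t).dropLast := rfl
      by_cases hl : (b::t).getLast hne = '.'
      · rw [if_pos (by simp [hl]), if_pos (by rw [hlast?', hlast?, hl]), List.append_nil]
        exact hdl.symm
      · rw [if_neg (by simp [hl]), if_neg (by rw [hlast?', hlast?]; simpa using hl)]
        rw [List.dropLast_concat_getLast hne]

-- B side, stage I: the streaming emitter pvE and its relation to the scan loop.
def pvE : Bool → List Char → List Char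
  | _, [] => []
  | b, c :: t => if c = '.' then (if b then [] else ['.']) ++ pvE true t else c :: pvE false t

-- the scan loop with its 15-cap removed
def pvScanU : List Char → List Char → List Char
  | out, [] => out
  | out, ch :: t =>
    if PySem.Chars.lowerChar ch = '.' then
      if out ≠ [] ∧ out.getLast? ≠ some '.' then pvScanU (out ++ ['.']) t
      else pvScanU out t
    else if pvAllowedB.contains (PySem.Chars.lowerChar ch) then
      pvScanU (out ++ [PySem.Chars.lowerChar ch]) t
    else pvScanU out t

theorem pvAllowed_contains (c : Char) :
    pvAllowed.contains c = true ↔ (pvAllowedB.contains c = true ∨ c = '.') := by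
  simp [pvAllowed]

theorem pvFL_cons (ch : Char) (t : List Char) :
    pvFL (ch :: t) = if pvAllowed.contains (PySem.Chars.lowerChar ch) then
      PySem.Chars.lowerChar ch :: pvFL t else pvFL t := by
  have hl : PySem.Chars.lower (ch :: t) = PySem.Chars.lowerChar ch :: PySem.Chars.lower t := rfl
  rw [pvFL, hl, List.filter_cons]
  by_cases h : pvAllowed.contains (PySem.Chars.lowerChar ch) = true
  · rw [if_pos h, if_pos h, pvFL]
  · rw [if_neg h, if_neg h, pvFL]

theorem pvScanU_eq : ∀ (cs out : List Char),
    pvScanU out cs = out ++ pvE (out.isEmpty || (out.getLast? == some '.')) (pvFL cs) := by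
  intro cs
  induction cs with
  | nil => intro out; simp [pvScanU, pvFL, PySem.Chars.lower, pvE]
  | cons ch t ih =>
    intro out
    by_cases hc : PySem.Chars.lowerChar ch = '.'
    · have hfl : pvFL (ch :: t) = '.' :: pvFL t := by
        rw [pvFL_cons, if_pos ((pvAllowed_contains _).mpr (Or.inr hc)), hc]
      rw [pvScanU, if_pos hc, hfl]
      by_cases hOut : out ≠ [] ∧ out.getLast? ≠ some '.'
      · have hb : (out.isEmpty || (out.getLast? == some '.')) = false := by
          simp [hOut.1, hOut.2]
        rw [if_pos hOut, ih (out ++ ['.']), hb]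
        have hb' : ((out ++ ['.']).isEmpty || ((out ++ ['.']).getLast? == some '.')) = true := by
          simp
        rw [hb']
        simp [pvE]
      · have hb : (out.isEmpty || (out.getLast? == some '.')) = true := by
          rcases not_and_or.mp hOut with h | h
          · simp at h; simp [h]
          · simp at h; simp [h]
        rw [if_neg hOut, ih out, hb]
        simp [pvE]
    · rw [pvScanU, if_neg hc]
      by_cases hm : pvAllowedB.contains (PySem.Chars.lowerChar ch) = true
      · have hfl : pvFL (ch :: t) = PySem.Chars.lowerChar ch :: pvFL t := by
          rw [pvFL_cons, if_pos ((pvAllowed_contains _).mpr (Or.inl hm))]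
        rw [if_pos hm, hfl, ih (out ++ [PySem.Chars.lowerChar ch])]
        have hb' : ((out ++ [PySem.Chars.lowerChar ch]).isEmpty ||
            ((out ++ [PySem.Chars.lowerChar ch]).getLast? == some '.')) = false := by
          simp [hc]
        rw [hb']
        simp [pvE, hc]
      · have hfl : pvFL (ch :: t) = pvFL t := by
          rw [pvFL_cons, if_neg (fun hx => by
            rcases (pvAllowed_contains _).mp hx with h | h
            · exact hm h
            · exact hc h)]
        rw [if_neg hm, hfl, ih out]

theorem pvScan_eq_take : ∀ (cs out : List Char), out.length ≤ 15 →
    pvScan out cs = (pvScanU out cs).take 15 := by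
  intro cs
  induction cs with
  | nil =>
    intro out h
    rw [pvScan, pvScanU, List.take_of_length_le h]
  | cons ch t ih =>
    intro out h
    rw [pvScan, pvScanU]
    by_cases h15 : out.length = 15
    · rw [if_pos h15]
      by_cases hc : PySem.Chars.lowerChar ch = '.'
      · rw [if_pos hc]
        by_cases hOut : out ≠ [] ∧ out.getLast? ≠ some '.'
        · rw [if_pos hOut, pvScanU_eq, List.append_assoc,
            List.take_append_of_le_length (by omega), List.take_of_length_le h]
        · rw [if_neg hOut, pvScanU_eq, List.take_append_of_le_length (by omega),
            List.take_of_length_le h]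
      · rw [if_neg hc]
        by_cases hm : pvAllowedB.contains (PySem.Chars.lowerChar ch) = true
        · rw [if_pos hm, pvScanU_eq, List.append_assoc,
            List.take_append_of_le_length (by omega), List.take_of_length_le h]
        · rw [if_neg hm, pvScanU_eq, List.take_append_of_le_length (by omega),
            List.take_of_length_le h]
    · rw [if_neg h15]
      by_cases hc : PySem.Chars.lowerChar ch = '.'
      · rw [if_pos hc, if_pos hc]
        by_cases hOut : out ≠ [] ∧ out.getLast? ≠ some '.'
        · rw [if_pos hOut, if_pos hOut, ih _ (by simp; omega)]
        · rw [if_neg hOut, if_neg hOut, ih _ h]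
      · rw [if_neg hc, if_neg hc]
        by_cases hm : pvAllowedB.contains (PySem.Chars.lowerChar ch) = true
        · rw [if_pos hm, if_pos hm, ih _ (by simp; omega)]
        · rw [if_neg hm, if_neg hm, ih _ h]

-- B side, stage II: pvE against squeeze-and-head-strip.
theorem pvE_squeeze (u : List Char) :
    pvE false u = pvSqueeze u ∧ pvE true u = pvHeadStrip (pvSqueeze u) := by
  induction u with
  | nil => exact ⟨rfl, rfl⟩
  | cons c t ih =>
    obtain ⟨ihF, ihT⟩ := ih
    by_cases hc : c = '.'
    · subst hc
      by_cases ht : t.head? = some '.'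
      · have hsq : pvSqueeze ('.' :: t) = pvSqueeze t := by rw [pvSqueeze, if_pos ⟨rfl, ht⟩]
        have hsqh : (pvSqueeze t).head? = some '.' := by rw [pvSqueeze_head?, ht]
        constructor
        · rw [pvE, if_pos rfl, hsq, ihT, pvHeadStrip, if_pos hsqh]
          cases hsq' : pvSqueeze t with
          | nil => rw [hsq'] at hsqh; simp at hsqh
          | cons d r =>
            rw [hsq'] at hsqh
            simp at hsqh
            simp [hsqh]
        · rw [pvE, if_pos rfl, hsq, ihT]
          simp
      · have hsq : pvSqueeze ('.' :: t) = '.' :: pvSqueeze t := by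
          rw [pvSqueeze, if_neg (by simp [ht])]
        have hsqh : (pvSqueeze t).head? ≠ some '.' := by rw [pvSqueeze_head?]; exact ht
        have hstr : pvHeadStrip (pvSqueeze t) = pvSqueeze t := by
          rw [pvHeadStrip, if_neg hsqh]
        constructor
        · rw [pvE, if_pos rfl, hsq, ihT, hstr]; simp
        · rw [pvE, if_pos rfl, ihT, hstr, hsq, pvHeadStrip, if_pos (by simp)]
          simp
    · have hsq : pvSqueeze (c :: t) = c :: pvSqueeze t := by
        rw [pvSqueeze, if_neg (by simp [hc])]
      constructor
      · rw [pvE, if_neg hc, hsq, ihF]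
      · rw [pvE, if_neg hc, hsq, pvHeadStrip, if_neg (by simp [hc]), ihF]

-- no-'..' facts about the mid-form
theorem pvNoDD_dropLast_last (v : List Char) (hv : ¬ ['.','.'] <:+: v)
    (h1 : v.getLast? = some '.') : v.dropLast.getLast? ≠ some '.' := by
  intro h2
  apply hv
  have e1 : v.dropLast ++ ['.'] = v := List.dropLast_append_getLast? '.' h1
  have e2 : v.dropLast.dropLast ++ ['.'] = v.dropLast := List.dropLast_append_getLast? '.' h2
  refine ⟨v.dropLast.dropLast, [], ?_⟩
  rw [List.append_nil, ← e1, ← e2]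
  simp

theorem pvTailStrip_last (v : List Char) (hv : ¬ ['.','.'] <:+: v) :
    (pvTailStrip v).getLast? ≠ some '.' := by
  rw [pvTailStrip]
  by_cases h1 : v.getLast? = some '.'
  · rw [if_pos h1]; exact pvNoDD_dropLast_last v hv h1
  · rw [if_neg h1]; exact h1

theorem pvHeadStrip_no_dd (v : List Char) (hv : ¬ ['.','.'] <:+: v) :
    ¬ ['.','.'] <:+: pvHeadStrip v := by
  rw [pvHeadStrip]
  split
  · exact fun hin => hv (hin.trans (List.tail_suffix v).isInfix)
  · exact hv

theorem pvHeadStrip_head (v : List Char) (hv : ¬ ['.','.'] <:+: v) :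
    (pvHeadStrip v).head? ≠ some '.' := by
  rw [pvHeadStrip]
  by_cases h : v.head? = some '.'
  · rw [if_pos h]
    cases v with
    | nil => simp at h
    | cons c r =>
      simp at h
      subst h
      intro h2
      cases r with
      | nil => simp at h2
      | cons d r' =>
        simp at h2
        exact hv (by rw [h2]; exact ⟨[], r', rfl⟩)
  · rw [if_neg h]; exact h

-- Stage 4 (A side): A's length-cased tail on t = pad3 of the staged slice-form tail.
theorem pvSingleton_suffix (s : List Char) (c : Char) : [c] <:+ s ↔ s.getLast? = some c := by
  constructor
  · rintro ⟨pre, rfl⟩; exact List.getLast?_concat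
  · intro h; exact ⟨s.dropLast, List.dropLast_append_getLast? c h⟩

theorem pvEndswith_dot (s : List Char) :
    PySem.Chars.endswith s ['.'] = true ↔ s.getLast? = some '.' := by
  rw [PySem.Chars.endswith_iff]; exact pvSingleton_suffix s '.'

theorem pvPad3_of_long (s : List Char) (h : 3 ≤ s.length) : pvPad3 s = s := by
  rw [pvPad3, if_neg (by omega)]

set_option maxRecDepth 4096 in
theorem pvTail_eq (t : List Char) (hlast : t.getLast? ≠ some '.') :
    (if t.length ≤ 2 then
       let l : Nat := 3 - t.length
       let c := PySem.List.slice t (some (PySem.List.len t - 1)) none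
       let f := (List.range l).foldl (fun f _ => f ++ c) t
       if f.length ≠ 0 then f else "aaa".toList
     else if 16 ≤ t.length then
       if PySem.List.slice t (some 14) (some 15) ≠ ['.'] then PySem.List.slice t (some 0) (some 15)
       else PySem.List.slice t (some 0) (some 14)
     else t) =
    pvPad3 (
      let s := if t.isEmpty then ['a'] else t
      let s := PySem.List.slice s none (some 15)
      if PySem.Chars.endswith s ['.'] then PySem.List.slice s none (some (-1)) else s) := by
  have hpad1 : ∀ x : Char, pvPad3 [x] = [x, x, x] := by
    intro x
    rw [pvPad3]; simp only [List.length_cons, List.length_nil, List.getLast?_cons, List.getLast?_nil]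
    norm_num
    rw [pvPad3]; simp only [List.length_cons, List.length_nil]
    norm_num
    rw [pvPad3]; simp only [List.length_cons, List.length_nil]
    norm_num
  have hpad2 : ∀ x y : Char, pvPad3 [x, y] = [x, y, y] := by
    intro x y
    rw [pvPad3]; simp only [List.length_cons, List.length_nil]
    norm_num
    rw [pvPad3]; simp only [List.length_cons, List.length_nil]
    norm_num
  dsimp only []
  match t with
  | [] =>
    rw [show (if ([] : List Char).isEmpty = true then ['a'] else []) = ['a'] from rfl]
    rw [show PySem.List.slice ['a'] none (some 15) = ['a'] from rfl]
    rw [show PySem.Chars.endswith ['a'] ['.'] = false from rfl]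
    simp only [Bool.false_eq_true, if_false, hpad1]
    rfl
  | c :: t' =>
    have hne : c :: t' ≠ [] := by simp
    by_cases h2 : (c :: t').length ≤ 2
    · match c, t' with
      | c, [] =>
        rw [if_pos (by simp)]
        rw [show PySem.List.slice [c] (some (PySem.List.len [c] - 1)) none = [c] from by
          show PySem.List.slice [c] (some 0) none = [c]
          simp]
        show (if ([c] ++ [c] ++ [c]).length ≠ 0 then [c] ++ [c] ++ [c] else "aaa".toList) = _
        rw [if_pos (by simp)]
        have hend : PySem.Chars.endswith [c] ['.'] = false := by
          rw [← Bool.not_eq_true, pvEndswith_dot]; simpa using hlast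
        rw [show (if ([c]).isEmpty = true then ['a'] else [c]) = [c] from rfl]
        rw [show PySem.List.slice [c] none (some 15) = [c] from by
          rw [show ((15:Int)) = ((15:Nat):Int) from rfl, PySem.List.slice_to_natCast]; rfl]
        rw [hend]
        simp only [Bool.false_eq_true, if_false, hpad1]
        rfl
      | c, [d] =>
        rw [if_pos (by simp)]
        rw [show PySem.List.slice [c, d] (some (PySem.List.len [c, d] - 1)) none = [d] from by
          show PySem.List.slice [c, d] (some 1) none = [d]
          rw [show ((1:Int)) = ((1:Nat):Int) from rfl, PySem.List.slice_from_natCast]; rfl]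
        show (if ([c, d] ++ [d]).length ≠ 0 then [c, d] ++ [d] else "aaa".toList) = _
        rw [if_pos (by simp)]
        have hend : PySem.Chars.endswith [c, d] ['.'] = false := by
          rw [← Bool.not_eq_true, pvEndswith_dot]; simpa using hlast
        rw [show (if ([c, d]).isEmpty = true then ['a'] else [c, d]) = [c, d] from rfl]
        rw [show PySem.List.slice [c, d] none (some 15) = [c, d] from by
          rw [show ((15:Int)) = ((15:Nat):Int) from rfl, PySem.List.slice_to_natCast]; rfl]
        rw [hend]
        simp only [Bool.false_eq_true, if_false, hpad2]
        rfl
      | c, d :: e :: t'' => simp at h2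
    · rw [if_neg h2]
      have hemp : (c :: t').isEmpty = false := by simp
      rw [show (if (c :: t').isEmpty then ['a'] else c :: t') = c :: t' from by rw [hemp]; simp]
      rw [show PySem.List.slice (c :: t') none (some 15) = (c :: t').take 15 from by
        rw [show ((15:Int)) = ((15:Nat):Int) from rfl, PySem.List.slice_to_natCast]]
      by_cases h16 : 16 ≤ (c :: t').length
      · rw [if_pos h16]
        have h14 : 14 < (c :: t').length := by omega
        have hs1415 : PySem.List.slice (c :: t') (some 14) (some 15) = [(c :: t')[14]] := by
          rw [PySem.List.slice_toNat _ (by norm_num) (by norm_num)]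
          rw [show (Int.toNat 15 - Int.toNat 14 : Nat) = 1 from rfl]
          rw [show (Int.toNat 14) = 14 from rfl]
          rw [List.drop_eq_getElem_cons h14, List.take_succ_cons, List.take_zero]
        have hs015 : PySem.List.slice (c :: t') (some 0) (some 15) = (c :: t').take 15 := by
          rw [PySem.List.slice_toNat _ (by norm_num) (by norm_num)]
          norm_num
          rw [show (Int.toNat 15) = 14 + 1 from rfl, List.take_succ_cons]
        have hs014 : PySem.List.slice (c :: t') (some 0) (some 14) = (c :: t').take 14 := by
          rw [PySem.List.slice_toNat _ (by norm_num) (by norm_num)]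
          norm_num
          rw [show (Int.toNat 14) = 13 + 1 from rfl, List.take_succ_cons]
        have htklen : ((c :: t').take 15).length = 15 := by rw [List.length_take]; omega
        have htklast : ((c :: t').take 15).getLast? = some ((c :: t')[14]) := by
          rw [List.getLast?_eq_getElem?, htklen]
          norm_num
        have hdl : ((c :: t').take 15).dropLast = (c :: t').take 14 := by
          rw [List.dropLast_take (by omega)]
        have hswap : (c :: t')[14]'(by omega) = t'[13]'(by simp at h14; omega) := by simp
        rw [hswap] at htklast hs1415
        by_cases hdot : t'[13]'(by simp at h14; omega) = '.'
        · rw [hs1415, if_neg (by simp [hdot]), hs014]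
          have hendT : PySem.Chars.endswith ((c :: t').take 15) ['.'] = true := by
            rw [pvEndswith_dot, htklast, hdot]
          rw [hendT, if_pos rfl]
          rw [PySem.List.slice_to_neg_one, hdl]
          rw [pvPad3_of_long _ (by rw [List.length_take]; omega)]
        · rw [hs1415, if_pos (by simp [hdot]), hs015]
          have hendT : PySem.Chars.endswith ((c :: t').take 15) ['.'] = false := by
            rw [← Bool.not_eq_true, pvEndswith_dot, htklast]
            simp [hdot]
          rw [hendT]
          simp only [Bool.false_eq_true, if_false]
          rw [pvPad3_of_long _ (by rw [htklen]; omega)]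
      · rw [if_neg h16]
        rw [List.take_of_length_le (by omega)]
        have hend : PySem.Chars.endswith (c :: t') ['.'] = false := by
          rw [← Bool.not_eq_true, pvEndswith_dot]; exact hlast
        rw [hend]
        simp only [Bool.false_eq_true, if_false]
        rw [pvPad3_of_long _ (by omega)]

-- the staged slice-form tail rewritten in plain list operations
theorem pvStagedTail_plain (t : List Char) :
    (let s := if t.isEmpty then ['a'] else t
     let s := PySem.List.slice s none (some 15)
     if PySem.Chars.endswith s ['.'] then PySem.List.slice s none (some (-1)) else s) =
    (let s1 := if t.isEmpty then ['a'] else t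
     let s2 := s1.take 15
     if s2.getLast? = some '.' then s2.dropLast else s2) := by
  dsimp only []
  rw [show ((15:Int)) = ((15:Nat):Int) from rfl, PySem.List.slice_to_natCast]
  by_cases h : ((if t.isEmpty then ['a'] else t).take 15).getLast? = some '.'
  · rw [if_pos ((pvEndswith_dot _).mpr h), if_pos h, PySem.List.slice_to_neg_one]
  · rw [if_neg (fun hx => h ((pvEndswith_dot _).mp hx)), if_neg h]

-- the tail bridge: staged tail on (tailStrip u) = Source B's tail on (u.take 15)
theorem pvRhs_eval (w : List Char) (hwne : w ≠ []) (hdl : w.dropLast ≠ []) :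
    (if (if w ≠ [] ∧ w.getLast? = some '.' then w.dropLast else w) = [] then ['a']
     else (if w ≠ [] ∧ w.getLast? = some '.' then w.dropLast else w)) =
    (if w.getLast? = some '.' then w.dropLast else w) := by
  by_cases hd : w.getLast? = some '.'
  · have hcnd : w ≠ [] ∧ w.getLast? = some '.' := ⟨hwne, hd⟩
    rw [if_pos hcnd, if_neg hdl, if_pos hd]
  · have hcnd : ¬(w ≠ [] ∧ w.getLast? = some '.') := fun hx => hd hx.2
    rw [if_neg hcnd, if_neg hwne, if_neg hd]

theorem pvTail_bridge (u : List Char) (hh : u.head? ≠ some '.') (hdd : ¬ ['.','.'] <:+: u) :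
    (let s1 := if (pvTailStrip u).isEmpty then ['a'] else pvTailStrip u
     let s2 := s1.take 15
     if s2.getLast? = some '.' then s2.dropLast else s2) =
    (let w := u.take 15
     let w1 := if w ≠ [] ∧ w.getLast? = some '.' then w.dropLast else w
     if w1 = [] then ['a'] else w1) := by
  dsimp only []
  match u with
  | [] => rfl
  | [c] =>
    have hc : c ≠ '.' := by simpa using hh
    simp [pvTailStrip, hc]
  | a :: b :: r =>
    have htk2 : (a :: b :: r).take 15 = a :: b :: r.take 13 := rfl
    have hwne : (a :: b :: r).take 15 ≠ [] := by rw [htk2]; simp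
    have hwdl : ((a :: b :: r).take 15).dropLast ≠ [] := by
      rw [htk2]
      cases r.take 13 <;> simp
    rw [pvRhs_eval _ hwne hwdl]
    by_cases hd : (a :: b :: r).getLast? = some '.'
    · rw [show pvTailStrip (a :: b :: r) = (a :: b :: r).dropLast from by
        rw [pvTailStrip, if_pos hd]]
      have hdlne : (a :: b :: r).dropLast ≠ [] := by
        intro hx
        have := congrArg List.length hx
        rw [List.length_dropLast] at this
        simp at this
      rw [show ((a :: b :: r).dropLast.isEmpty) = false from by
        cases hvd : (a :: b :: r).dropLast with
        | nil => exact absurd hvd hdlne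
        | cons x xs => rfl]
      simp only [Bool.false_eq_true, if_false]
      by_cases h16 : 16 ≤ (a :: b :: r).length
      · rw [show (a :: b :: r).dropLast.take 15 = (a :: b :: r).take 15 from by
          rw [List.dropLast_eq_take, List.take_take]
          congr 1
          simp at h16 ⊢
          omega]
      · rw [List.take_of_length_le (by rw [List.length_dropLast]; omega),
          List.take_of_length_le (by omega : (a :: b :: r).length ≤ 15)]
        rw [if_neg (pvNoDD_dropLast_last _ hdd hd), if_pos hd]
    · rw [show pvTailStrip (a :: b :: r) = (a :: b :: r) from by
        rw [pvTailStrip, if_neg hd]]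
      rw [show ((a :: b :: r) : List Char).isEmpty = false from rfl]
      simp only [Bool.false_eq_true, if_false]

theorem solA_eq_solB (cs : List Char) (h : ∀ c ∈ cs, pvDomChar c = true) :
    pvSolA cs = pvSolB cs := by
  unfold pvSolA pvSolB
  dsimp only []
  rw [pvLoop1_eq cs h, pvWhileCollapse_eq, pvLoop3_eq]
  rw [pvScan_eq_take cs [] (by simp), pvScanU_eq cs [], List.nil_append]
  rw [show (([] : List Char).isEmpty || (([] : List Char).getLast? == some '.')) = true from rfl]
  rw [(pvE_squeeze (pvFL cs)).2]
  have hdd := pvSqueeze_no_dd (pvFL cs)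
  have hh := pvHeadStrip_head _ hdd
  have hdd' := pvHeadStrip_no_dd _ hdd
  have hlast : (pvStripEdge (pvSqueeze (pvFL cs))).getLast? ≠ some '.' :=
    pvTailStrip_last _ hdd'
  rw [pvTail_eq _ hlast, pvStagedTail_plain]
  rw [show pvStripEdge (pvSqueeze (pvFL cs)) = pvTailStrip (pvHeadStrip (pvSqueeze (pvFL cs))) from rfl]
  rw [pvTail_bridge _ hh hdd']

-- ===== VERDICT (by name: the statement is the Claim_ definition above) =====
theorem solution_spec : Claim_equal_solution := by
  intro new_id hdom
  unfold Spec_solution solution solution_alt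
  have h : ∀ c ∈ new_id.toList, pvDomChar c = true := by
    simpa [Dom_solution, pvDomStr, List.all_eq_true] using hdom
  rw [solA_eq_solB _ h]
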